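-- pv_equiv track=rewrite | github.com/kevin000001505/Hackathon-Tinder-Restaurant | backend/utils/helpers.py | upadate_cluster_weights
-- ===== SOURCE A (Python) =====
-- def upadate_cluster_weights(
--     whole_dict: dict, like_dict: dict, dislike_dict: dict
-- ) -> dict:
--     """
--     Update the cluster weights based on user preferences.
--     """
--     for cluster in whole_dict:
--         if cluster in like_dict:
--             whole_dict[cluster] += 1
--         if cluster in dislike_dict:
--             whole_dict[cluster] -= 1
--     return whole_dict
-- ===== SOURCE B (Python) =====
-- def upadate_cluster_weights(whole_dict, like_dict, dislike_dict):
--     for cluster in like_dict: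
--         if cluster in whole_dict:
--             whole_dict[cluster] += 1
--     for cluster in dislike_dict:
--         if cluster in whole_dict:
--             whole_dict[cluster] -= 1
--     return whole_dict
-- ===== Notes on version B (the rewrite author's own statement) =====
-- stated objective: alternative
-- what changed: Iteration is driven off the preference dicts instead of whole_dict: two separate loops over like_dict's and dislike_dict's keys each update whole_dict[k] when k is present, instead of one loop over whole_dict membership-testing both preference dicts.
import Mathlib
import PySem

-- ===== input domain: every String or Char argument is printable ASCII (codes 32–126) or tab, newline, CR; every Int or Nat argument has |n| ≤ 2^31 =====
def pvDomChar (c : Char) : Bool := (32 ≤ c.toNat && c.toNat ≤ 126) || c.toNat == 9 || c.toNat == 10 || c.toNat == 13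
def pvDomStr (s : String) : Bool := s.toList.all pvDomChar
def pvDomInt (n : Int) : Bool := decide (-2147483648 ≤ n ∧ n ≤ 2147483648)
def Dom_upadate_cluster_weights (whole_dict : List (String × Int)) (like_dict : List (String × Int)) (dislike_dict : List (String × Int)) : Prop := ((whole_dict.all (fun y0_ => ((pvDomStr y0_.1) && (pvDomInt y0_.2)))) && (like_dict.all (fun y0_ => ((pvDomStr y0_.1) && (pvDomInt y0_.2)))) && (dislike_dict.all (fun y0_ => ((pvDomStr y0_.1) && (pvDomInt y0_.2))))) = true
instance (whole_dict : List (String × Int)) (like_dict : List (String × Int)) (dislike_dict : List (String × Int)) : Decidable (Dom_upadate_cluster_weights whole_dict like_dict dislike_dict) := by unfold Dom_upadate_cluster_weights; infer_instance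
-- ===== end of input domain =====

-- B iterates over the two preference dicts and updates each matching whole_dict key, instead of
-- A's single loop over whole_dict; both mutate and return the same dict object in Python, and the
-- equivalence proved here is about the returned value.


-- ===== PORT A =====
-- A's loop visits each key of whole_dict once and updates that key's own value in place; under
-- Pre_ (distinct keys, as in any Python dict) that is exactly a map over the entries.
def pvStepA (like_dict dislike_dict : List (String × Int)) (p : String × Int) : String × Int :=
  let v1 := if p.1 ∈ like_dict.map Prod.fst then p.2 + 1 else p.2
  let v2 := if p.1 ∈ dislike_dict.map Prod.fst then v1 - 1 else v1
  (p.1, v2)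

def upadate_cluster_weights (whole_dict : List (String × Int)) (like_dict : List (String × Int)) (dislike_dict : List (String × Int)) : List (String × Int) :=
  whole_dict.map (pvStepA like_dict dislike_dict)

-- ===== PORT B =====
-- whole_dict[k] += δ : update the first entry with key k (assoc-list dict update)
def pvUpd : List (String × Int) → String → Int → List (String × Int)
  | [], _, _ => []
  | p :: rest, k, δ => if p.1 = k then (p.1, p.2 + δ) :: rest else p :: pvUpd rest k δ

-- one of B's loops: for k in prefs: if k in whole_dict: whole_dict[k] += δ
def pvPass (whole : List (String × Int)) (prefs : List (String × Int)) (δ : Int) : List (String × Int) :=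
  prefs.foldl (fun acc p => if p.1 ∈ acc.map Prod.fst then pvUpd acc p.1 δ else acc) whole

def upadate_cluster_weights_alt (whole_dict : List (String × Int)) (like_dict : List (String × Int)) (dislike_dict : List (String × Int)) : List (String × Int) :=
  pvPass (pvPass whole_dict like_dict 1) dislike_dict (-1)

-- ===== PRECONDITION & SPEC =====
-- All three arguments are Python dicts, whose keys are distinct; an association list with
-- duplicate keys represents no dict input (Python collapses it before the function ever runs),
-- so Pre_ excludes duplicate-key lists.
def Pre_upadate_cluster_weights (whole_dict : List (String × Int)) (like_dict : List (String × Int)) (dislike_dict : List (String × Int)) : Prop :=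
  (whole_dict.map Prod.fst).Nodup ∧ (like_dict.map Prod.fst).Nodup ∧ (dislike_dict.map Prod.fst).Nodup
instance (whole_dict : List (String × Int)) (like_dict : List (String × Int)) (dislike_dict : List (String × Int)) : Decidable (Pre_upadate_cluster_weights whole_dict like_dict dislike_dict) := by unfold Pre_upadate_cluster_weights; infer_instance

def pvWitness_upadate_cluster_weights : (List (String × Int)) × (List (String × Int)) × (List (String × Int)) :=
  ([("a", 1), ("b", 2)], [("a", 0), ("c", 5)], [("b", 0)])

def Spec_upadate_cluster_weights (whole_dict : List (String × Int)) (like_dict : List (String × Int)) (dislike_dict : List (String × Int)) (out : List (String × Int)) : Prop := out = upadate_cluster_weights_alt whole_dict like_dict dislike_dict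
instance (whole_dict : List (String × Int)) (like_dict : List (String × Int)) (dislike_dict : List (String × Int)) (out : List (String × Int)) : Decidable (Spec_upadate_cluster_weights whole_dict like_dict dislike_dict out) := by unfold Spec_upadate_cluster_weights; infer_instance

-- ===== CLAIM (what is proved, stated in full; the proofs are below) =====
def Claim_equal_upadate_cluster_weights : Prop := ∀ (whole_dict : List (String × Int)) (like_dict : List (String × Int)) (dislike_dict : List (String × Int)), Dom_upadate_cluster_weights whole_dict like_dict dislike_dict → Pre_upadate_cluster_weights whole_dict like_dict dislike_dict → Spec_upadate_cluster_weights whole_dict like_dict dislike_dict (upadate_cluster_weights whole_dict like_dict dislike_dict)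

-- ===== LEMMAS AND PROOFS =====

theorem keys_pvUpd (w : List (String × Int)) (k : String) (δ : Int) :
    (pvUpd w k δ).map Prod.fst = w.map Prod.fst := by
  induction w with
  | nil => rfl
  | cons p rest ih =>
    simp only [pvUpd]
    split <;> simp [ih]

theorem map_ite_id_of_not_mem (w : List (String × Int)) (k : String) (δ : Int)
    (h : k ∉ w.map Prod.fst) :
    w.map (fun p => if p.1 = k then (p.1, p.2 + δ) else p) = w := by
  induction w with
  | nil => rfl
  | cons p rest ih =>
    simp only [List.map_cons, List.mem_cons, not_or] at h ⊢
    rw [if_neg (fun he => h.1 he.symm), ih h.2]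

theorem pvUpd_eq_map (w : List (String × Int)) (k : String) (δ : Int)
    (hw : (w.map Prod.fst).Nodup) :
    pvUpd w k δ = w.map (fun p => if p.1 = k then (p.1, p.2 + δ) else p) := by
  induction w with
  | nil => rfl
  | cons p rest ih =>
    simp only [List.map_cons, List.nodup_cons] at hw
    simp only [pvUpd, List.map_cons]
    by_cases h : p.1 = k
    · rw [if_pos h, if_pos h, map_ite_id_of_not_mem rest k δ (h ▸ hw.1)]
    · rw [if_neg h, if_neg h, ih hw.2]

theorem pvPass_eq_map (prefs : List (String × Int)) (w : List (String × Int)) (δ : Int)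
    (hw : (w.map Prod.fst).Nodup) (hp : (prefs.map Prod.fst).Nodup) :
    pvPass w prefs δ = w.map (fun p => if p.1 ∈ prefs.map Prod.fst then (p.1, p.2 + δ) else p) := by
  induction prefs generalizing w with
  | nil =>
    simp [pvPass]
  | cons q prefs' ih =>
    simp only [List.map_cons, List.nodup_cons] at hp
    have step : pvPass w (q :: prefs') δ =
        pvPass (if q.1 ∈ w.map Prod.fst then pvUpd w q.1 δ else w) prefs' δ := by
      simp [pvPass]
    rw [step]
    by_cases hq : q.1 ∈ w.map Prod.fst
    · rw [if_pos hq]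
      have hw' : ((pvUpd w q.1 δ).map Prod.fst).Nodup := by rw [keys_pvUpd]; exact hw
      rw [ih (pvUpd w q.1 δ) hw' hp.2, pvUpd_eq_map w q.1 δ hw, List.map_map]
      refine List.map_congr_left (fun p _ => ?_)
      by_cases h : p.1 = q.1
      · simp only [Function.comp, if_pos h]
        rw [if_neg (by simpa [h] using hp.1), if_pos (by simp [h])]
      · simp only [Function.comp, if_neg h]
        by_cases h2 : p.1 ∈ prefs'.map Prod.fst
        · rw [if_pos h2, if_pos (by simp [h, h2])]
        · rw [if_neg h2, if_neg (by simp [h, h2])]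
    · rw [if_neg hq, ih w hw hp.2]
      refine List.map_congr_left (fun p hpw => ?_)
      have h : p.1 ≠ q.1 := by
        intro he
        exact hq (he ▸ List.mem_map_of_mem hpw)
      by_cases h2 : p.1 ∈ prefs'.map Prod.fst
      · rw [if_pos h2, if_pos (by simp [h, h2])]
      · rw [if_neg h2, if_neg (by simp [h, h2])]

-- ===== VERDICT (by name: the statement is the Claim_ definition above) =====
theorem upadate_cluster_weights_spec : Claim_equal_upadate_cluster_weights := by
  intro w l d _ hpre
  obtain ⟨hw, hl, hd⟩ := hpre
  show upadate_cluster_weights w l d = upadate_cluster_weights_alt w l d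
  unfold upadate_cluster_weights upadate_cluster_weights_alt
  have hw1 : (((pvPass w l 1).map Prod.fst)).Nodup := by
    rw [pvPass_eq_map l w 1 hw hl]
    have : (Prod.fst ∘ fun p : String × Int => if p.1 ∈ List.map Prod.fst l then (p.1, p.2 + 1) else p) = Prod.fst := by
      funext p; by_cases h : p.1 ∈ List.map Prod.fst l <;> simp [h]
    rw [List.map_map, this]; exact hw
  rw [pvPass_eq_map d (pvPass w l 1) (-1) hw1 hd, pvPass_eq_map l w 1 hw hl, List.map_map]
  refine List.map_congr_left (fun p _ => ?_)
  simp only [Function.comp, pvStepA]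
  by_cases h1 : p.1 ∈ l.map Prod.fst <;> by_cases h2 : p.1 ∈ d.map Prod.fst <;>
    simp [h1, h2] <;> omega
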